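-- pv_equiv track=rewrite | github.com/stpku/awesome_spatial_temporal_ai | validate_data.py | validate_media_channels
-- ===== SOURCE A (Python) =====
-- def validate_media_channels(data: dict) -> list:
--     """Validate media_channels.json"""
--     errors = []
--
--     # Validate wechat publications
--     for i, pub in enumerate(data.get("wechat_publications", [])):
--         if "name" not in pub:
--             errors.append(f"wechat_publications[{i}]: missing name")
--
--     # Validate newsletters
--     for i, news in enumerate(data.get("newsletters", [])):
--         if "name" not in news:
--             errors.append(f"newsletters[{i}]: missing name")
--         if "url" not in news:
--             errors.append(f"newsletters[{i}]: missing url")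
--
--     return errors
-- ===== SOURCE B (Python) =====
-- def _missing(key, fields, items, i):
--     """Messages for required fields absent from items[0:], indices starting at i."""
--     if not items:
--         return []
--     head = items[0]
--     here = [f"{key}[{i}]: missing {f}" for f in fields if f not in head]
--     return here + _missing(key, fields, items[1:], i + 1)
--
--
-- def validate_media_channels(data: dict) -> list:
--     """Validate media_channels.json"""
--     return (_missing("wechat_publications", ["name"], data.get("wechat_publications", []), 0)
--             + _missing("newsletters", ["name", "url"], data.get("newsletters", []), 0))
-- ===== Notes on version B (the rewrite author's own statement) =====
-- stated objective: alternative
-- what changed: Replaced A's iterative accumulator loops (enumerate + append into a shared errors list) with a pure recursive helper that computes each item's missing-field messages by comprehension and concatenates section results back-to-front, returning the two sections' lists joined.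
import Mathlib
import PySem

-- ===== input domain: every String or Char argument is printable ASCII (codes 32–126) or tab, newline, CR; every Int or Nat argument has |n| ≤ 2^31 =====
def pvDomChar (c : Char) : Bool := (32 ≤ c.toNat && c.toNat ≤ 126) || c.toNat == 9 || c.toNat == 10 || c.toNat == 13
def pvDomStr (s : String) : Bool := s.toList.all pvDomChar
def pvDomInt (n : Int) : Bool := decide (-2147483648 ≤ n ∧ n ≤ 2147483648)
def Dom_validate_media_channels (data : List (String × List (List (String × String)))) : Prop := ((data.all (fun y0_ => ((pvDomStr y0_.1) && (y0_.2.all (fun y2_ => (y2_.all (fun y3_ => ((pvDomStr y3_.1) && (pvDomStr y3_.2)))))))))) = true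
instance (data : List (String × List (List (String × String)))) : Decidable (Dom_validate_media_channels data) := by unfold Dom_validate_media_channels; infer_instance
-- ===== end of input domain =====

-- B replaces A's accumulator loops with a pure recursive helper returning per-item
-- comprehension results concatenated back-to-front (objective: alternative decomposition).

-- ===== PORT A =====
-- dict.get(key, []) on an association list: value of the FIRST pair with that key, else [].
def pyDictGetD (data : List (String × List (List (String × String)))) (key : String) :
    List (List (String × String)) :=
  match data.find? (fun p => p.1 == key) with
  | some p => p.2
  | none => []

-- "k" not in item  (dict membership = key membership)
def pyKeyAbsent (k : String) (item : List (String × String)) : Bool :=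
  !(item.any (fun p => p.1 == k))

def validate_media_channels (data : List (String × List (List (String × String)))) : List String :=
  let errors : List String := []
  let errors := (PySem.List.enumerate (pyDictGetD data "wechat_publications")).foldl
    (fun errors ip =>
      if pyKeyAbsent "name" ip.2 then
        errors ++ ["wechat_publications[" ++ PySem.Int.toStr ip.1 ++ "]: missing name"]
      else errors) errors
  let errors := (PySem.List.enumerate (pyDictGetD data "newsletters")).foldl
    (fun errors ip =>
      let errors :=
        if pyKeyAbsent "name" ip.2 then
          errors ++ ["newsletters[" ++ PySem.Int.toStr ip.1 ++ "]: missing name"]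
        else errors
      if pyKeyAbsent "url" ip.2 then
        errors ++ ["newsletters[" ++ PySem.Int.toStr ip.1 ++ "]: missing url"]
      else errors) errors
  errors

-- ===== PORT B =====
-- recursive helper _missing from Source B: per-item comprehension, results concatenated
def bMissing (key : String) (fields : List String)
    (items : List (List (String × String))) (i : Int) : List String :=
  match items with
  | [] => []
  | head :: rest =>
    ((fields.filter (fun f => pyKeyAbsent f head)).map
        (fun f => key ++ "[" ++ PySem.Int.toStr i ++ "]: missing " ++ f))
      ++ bMissing key fields rest (i + 1)

def validate_media_channels_alt (data : List (String × List (List (String × String)))) : List String :=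
  bMissing "wechat_publications" ["name"] (pyDictGetD data "wechat_publications") 0
    ++ bMissing "newsletters" ["name", "url"] (pyDictGetD data "newsletters") 0

-- ===== PRECONDITION & SPEC =====
def Spec_validate_media_channels (data : List (String × List (List (String × String)))) (out : List String) : Prop := out = validate_media_channels_alt data
instance (data : List (String × List (List (String × String)))) (out : List String) : Decidable (Spec_validate_media_channels data out) := by unfold Spec_validate_media_channels; infer_instance

-- ===== CLAIM (what is proved, stated in full; the proofs are below) =====
def Claim_equal_validate_media_channels : Prop := ∀ (data : List (String × List (List (String × String)))), Dom_validate_media_channels data → Spec_validate_media_channels data (validate_media_channels data)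

-- ===== LEMMAS AND PROOFS =====
theorem str_w : "wechat_publications" ++ "[" = "wechat_publications[" := rfl
theorem str_n : "newsletters" ++ "[" = "newsletters[" := rfl
theorem str_name : "]: missing " ++ "name" = "]: missing name" := rfl
theorem str_url : "]: missing " ++ "url" = "]: missing url" := rfl

theorem wechat_loop (L : List (List (String × String))) :
    ∀ (acc : List String) (i : Int),
    (PySem.List.enumerate L i).foldl
      (fun errors ip =>
        if pyKeyAbsent "name" ip.2 then
          errors ++ ["wechat_publications[" ++ PySem.Int.toStr ip.1 ++ "]: missing name"]
        else errors) acc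
      = acc ++ bMissing "wechat_publications" ["name"] L i := by
  induction L with
  | nil => intro acc i; simp [PySem.List.enumerate_nil, bMissing]
  | cons head rest ih =>
    intro acc i
    simp only [PySem.List.enumerate_cons, List.foldl_cons]
    rw [ih]
    simp only [bMissing, List.filter]
    by_cases h : pyKeyAbsent "name" head <;>
      simp [h, List.append_assoc, String.append_assoc, str_w, str_name]

theorem news_loop (L : List (List (String × String))) :
    ∀ (acc : List String) (i : Int),
    (PySem.List.enumerate L i).foldl
      (fun errors ip =>
        let errors :=
          if pyKeyAbsent "name" ip.2 then
            errors ++ ["newsletters[" ++ PySem.Int.toStr ip.1 ++ "]: missing name"]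
          else errors
        if pyKeyAbsent "url" ip.2 then
          errors ++ ["newsletters[" ++ PySem.Int.toStr ip.1 ++ "]: missing url"]
        else errors) acc
      = acc ++ bMissing "newsletters" ["name", "url"] L i := by
  induction L with
  | nil => intro acc i; simp [PySem.List.enumerate_nil, bMissing]
  | cons head rest ih =>
    intro acc i
    simp only [PySem.List.enumerate_cons, List.foldl_cons]
    rw [ih]
    simp only [bMissing, List.filter]
    by_cases h1 : pyKeyAbsent "name" head <;> by_cases h2 : pyKeyAbsent "url" head <;>
      simp [h1, h2, List.append_assoc, String.append_assoc, str_n, str_name, str_url]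

-- ===== VERDICT (by name: the statement is the Claim_ definition above) =====
theorem validate_media_channels_spec : Claim_equal_validate_media_channels := by
  intro data _
  unfold Spec_validate_media_channels validate_media_channels validate_media_channels_alt
  simp only [wechat_loop, news_loop, List.nil_append]
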